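-- pv_equiv track=rewrite | github.com/disha7632/Assignments | Module3(assignment)/module3.1.py | get_largest_smallest_sum
-- ===== SOURCE A (Python) =====
-- def get_largest_smallest_sum(numbers):
--     if not numbers:
--         return None, None, 0  # Return None for largest and smallest if the list is empty
--     largest = smallest = numbers[0]
--     total = 0
--     for number in numbers:
--         total += number
--         if number > largest:
--             largest = number
--         elif number < smallest:
--             smallest = number
--     return largest, smallest, total
-- ===== SOURCE B (Python) =====
-- def get_largest_smallest_sum(numbers):
--     if not numbers:
--         return None, None, 0
--     return max(numbers), min(numbers), sum(numbers)
-- ===== Notes on version B (the rewrite author's own statement) =====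
-- stated objective: idiomatic
-- what changed: Replaces the single fused accumulator loop (running max/min/sum with branch logic) by three independent built-in reductions max/min/sum behind the same empty-list guard.
import Mathlib
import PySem

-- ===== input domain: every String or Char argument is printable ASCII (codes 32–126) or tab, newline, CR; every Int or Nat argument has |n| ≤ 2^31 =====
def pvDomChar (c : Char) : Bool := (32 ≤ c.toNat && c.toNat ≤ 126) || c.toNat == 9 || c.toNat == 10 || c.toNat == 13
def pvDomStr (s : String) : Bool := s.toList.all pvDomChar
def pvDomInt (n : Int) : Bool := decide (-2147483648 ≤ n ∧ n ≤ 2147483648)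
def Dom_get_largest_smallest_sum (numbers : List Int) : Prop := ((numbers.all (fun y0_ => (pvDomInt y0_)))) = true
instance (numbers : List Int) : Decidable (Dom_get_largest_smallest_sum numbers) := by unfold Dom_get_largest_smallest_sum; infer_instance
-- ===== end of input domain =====

-- B replaces A's fused running max/min/sum loop by three independent built-in reductions (idiomatic).


-- ===== PORT A =====
-- the for-loop over (total, largest, smallest), branches in A's order
def getLssLoop : List Int → Int → Int → Int → Int × Int × Int
  | [], largest, smallest, total => (largest, smallest, total)
  | n :: t, largest, smallest, total =>
      let total := total + n
      if n > largest then getLssLoop t n smallest total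
      else if n < smallest then getLssLoop t largest n total
      else getLssLoop t largest smallest total

def get_largest_smallest_sum (numbers : List Int) : Option Int × Option Int × Int :=
  match numbers with
  | [] => (none, none, 0)
  | x :: _ =>
      let (l, s, t) := getLssLoop numbers x x 0
      (some l, some s, t)

-- ===== PORT B =====
def get_largest_smallest_sum_alt (numbers : List Int) : Option Int × Option Int × Int :=
  match numbers with
  | [] => (none, none, 0)
  | _ => (PySem.List.max? numbers (fun y => y), PySem.List.min? numbers (fun y => y), numbers.sum)

-- ===== PRECONDITION & SPEC =====
def Spec_get_largest_smallest_sum (numbers : List Int) (out : Option Int × Option Int × Int) : Prop := out = get_largest_smallest_sum_alt numbers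
instance (numbers : List Int) (out : Option Int × Option Int × Int) : Decidable (Spec_get_largest_smallest_sum numbers out) := by unfold Spec_get_largest_smallest_sum; infer_instance

-- ===== CLAIM (what is proved, stated in full; the proofs are below) =====
def Claim_equal_get_largest_smallest_sum : Prop := ∀ (numbers : List Int), Dom_get_largest_smallest_sum numbers → Spec_get_largest_smallest_sum numbers (get_largest_smallest_sum numbers)

-- ===== LEMMAS AND PROOFS =====
theorem getLssLoop_eq (l : List Int) (L S T : Int) (h : S ≤ L) :
    getLssLoop l L S T = (l.foldl max L, l.foldl min S, T + l.sum) := by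
  induction l generalizing L S T with
  | nil => simp [getLssLoop]
  | cons n t ih =>
    simp only [getLssLoop, List.foldl_cons, List.sum_cons]
    split_ifs with h1 h2
    · rw [ih n S (T + n) (le_of_lt (lt_of_le_of_lt h h1))]
      rw [max_eq_right (le_of_lt h1), min_eq_left (h.trans (le_of_lt h1))]
      ring_nf
    · rw [ih L n (T + n) (le_of_not_gt h1)]
      rw [max_eq_left (le_of_not_gt h1), min_eq_right (le_of_lt h2)]
      ring_nf
    · rw [ih L S (T + n) h]
      rw [max_eq_left (le_of_not_gt h1), min_eq_left (le_of_not_gt h2)]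
      ring_nf

-- ===== VERDICT (by name: the statement is the Claim_ definition above) =====
theorem get_largest_smallest_sum_spec : Claim_equal_get_largest_smallest_sum := by
  intro numbers _
  unfold Spec_get_largest_smallest_sum get_largest_smallest_sum get_largest_smallest_sum_alt
  match numbers with
  | [] => rfl
  | x :: t =>
    simp [getLssLoop_eq (x :: t) x x 0 le_rfl, PySem.List.max?_id_cons, PySem.List.min?_id_cons]
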